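-- pv_equiv track=rewrite | github.com/MrBrantCode/unitest_baseline | mut_generate/mist_train_taco/taco_11314/solution.py | calculate_goodness_path
-- ===== SOURCE A (Python) =====
-- def is_prime(n):
--     if n == 2 or n == 3:
--         return True
--     elif n < 2 or n % 2 == 0:
--         return False
--
--     limit = int(n**0.5) + 1
--     for i in range(3, limit, 2):
--         if n % i == 0:
--             return False
--     return True
--
-- def calculate_goodness_path(x, y):
--     if x == y:
--         return -x if is_prime(x) else x
--
--     root_x = []
--     root_y = []
--     i = x
--     j = y
--
--     while i:
--         root_x.append(i)
--         i //= 2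
--     while j:
--         root_y.append(j)
--         j //= 2
--
--     ca = max(set(root_x) & set(root_y))
--     path = root_x[:root_x.index(ca)] + [ca] + root_y[:root_y.index(ca)]
--     answer = 0
--
--     for node in path:
--         if is_prime(node):
--             answer -= node
--         else:
--             answer += node
--
--     return answer
-- ===== SOURCE B (Python) =====
-- def is_prime(n):
--     if n == 2 or n == 3:
--         return True
--     elif n < 2 or n % 2 == 0:
--         return False
--
--     limit = int(n**0.5) + 1
--     for i in range(3, limit, 2):
--         if n % i == 0:
--             return False
--     return True
--
--
-- def calculate_goodness_path(x, y):
--     # Two cursors climb toward the root; the larger one is never the LCA,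
--     # so add its contribution and halve it.  When they meet, that node is
--     # the LCA: add its contribution once and return.
--     total = 0
--     while x != y:
--         if x > y:
--             total += -x if is_prime(x) else x
--             x //= 2
--         else:
--             total += -y if is_prime(y) else y
--             y //= 2
--     return total + (-x if is_prime(x) else x)
-- ===== Notes on version B (the rewrite author's own statement) =====
-- stated objective: simpler
-- what changed: Replaces A's two materialised root-chains plus set-intersection, max, index and slice machinery with a direct two-cursor climb that always advances the larger node and accumulates each node's (negated-if-prime) contribution until the cursors meet at the LCA.
import Mathlib
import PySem

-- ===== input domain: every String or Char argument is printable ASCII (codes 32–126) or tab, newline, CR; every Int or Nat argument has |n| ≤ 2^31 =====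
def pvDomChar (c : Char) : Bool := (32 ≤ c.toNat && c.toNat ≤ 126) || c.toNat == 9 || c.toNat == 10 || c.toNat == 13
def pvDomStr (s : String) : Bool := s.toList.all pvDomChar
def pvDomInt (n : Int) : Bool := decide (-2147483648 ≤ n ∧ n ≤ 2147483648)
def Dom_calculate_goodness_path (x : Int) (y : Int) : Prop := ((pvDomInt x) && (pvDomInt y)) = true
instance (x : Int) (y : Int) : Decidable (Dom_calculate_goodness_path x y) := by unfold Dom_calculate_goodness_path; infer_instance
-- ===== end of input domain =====

-- B replaces A's two ancestor lists + set intersection + max + index/slice machinery by a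
-- two-cursor climb (always advance the larger node), which is simpler and allocation-free.

-- ===== PORT A =====
-- is_prime, shared verbatim by Source A and Source B.
-- int(n**0.5) is ported as Nat.sqrt: exact for 0 ≤ n ≤ 2^31, where the double sqrt
-- of Python's n**0.5 never crosses an integer boundary.
def isPrime (n : Int) : Bool :=
  if n = 2 ∨ n = 3 then true
  else if n < 2 ∨ PySem.Int.mod n 2 = 0 then false
  else
    let limit : Int := (Nat.sqrt n.toNat : Int) + 1
    -- 'for i in range(3, limit, 2): if n % i == 0: return False' then 'return True'
    !((PySem.List.pyRange 3 limit 2).any (fun i => PySem.Int.mod n i == 0))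

-- 'while i: root.append(i); i //= 2'.  For i < 0 the Python loop never terminates
-- (those inputs are outside Pre_); the 'i < 0 → []' branch is only a totality guard.
def chainA (i : Int) : List Int :=
  if i = 0 then []
  else if i < 0 then []
  else i :: chainA (PySem.Int.floordiv i 2)
termination_by i.toNat
decreasing_by
  rw [PySem.Int.floordiv_eq_ediv_of_pos (by omega : (0:Int) < 2)]
  omega

def calculate_goodness_path (x : Int) (y : Int) : Int :=
  if x = y then (if isPrime x then -x else x)
  else
    let root_x := chainA x
    let root_y := chainA y
    -- ca = max(set(root_x) & set(root_y)); max of a set is order-independent.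
    match PySem.List.max? (PySem.Set.inter (PySem.Set.ofList root_x) (PySem.Set.ofList root_y)) (fun v => v) with
    | none => 0  -- Python raises ValueError (max of an empty set) here; excluded by Pre_
    | some ca =>
      -- root[:root.index(ca)] = take of the index; ca ∈ root under Pre_, so index? is some
      let kx := (PySem.List.index? root_x ca).getD 0
      let ky := (PySem.List.index? root_y ca).getD 0
      let path := root_x.take kx ++ [ca] ++ root_y.take ky
      path.foldl (fun a node => if isPrime node then a - node else a + node) 0

-- ===== PORT B =====
-- 'while x != y: ...' of Source B; the '0 ≤ x ∧ 0 ≤ y' conjunct is only a totality guard: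
-- with a negative cursor the Python loop never terminates (outside Pre_).
def loopB (x : Int) (y : Int) (total : Int) : Int :=
  if _h : x ≠ y ∧ 0 ≤ x ∧ 0 ≤ y then
    if x > y then loopB (PySem.Int.floordiv x 2) y (total + (if isPrime x then -x else x))
    else loopB x (PySem.Int.floordiv y 2) (total + (if isPrime y then -y else y))
  else total + (if isPrime x then -x else x)
termination_by (x.toNat + y.toNat)
decreasing_by
  · rw [PySem.Int.floordiv_eq_ediv_of_pos (by omega : (0:Int) < 2)]
    omega
  · rw [PySem.Int.floordiv_eq_ediv_of_pos (by omega : (0:Int) < 2)]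
    omega

def calculate_goodness_path_alt (x : Int) (y : Int) : Int := loopB x y 0

-- ===== PRECONDITION & SPEC =====
-- A returns exactly on node indices ≥ 1 and on the early-return diagonal x = y;
-- elsewhere A raises ValueError (a zero coordinate) or loops forever (a negative one).
def Pre_calculate_goodness_path (x : Int) (y : Int) : Prop := (1 ≤ x ∧ 1 ≤ y) ∨ x = y
instance (x : Int) (y : Int) : Decidable (Pre_calculate_goodness_path x y) := by unfold Pre_calculate_goodness_path; infer_instance

def pvWitness_calculate_goodness_path : Int × Int := (6, 3)

def Spec_calculate_goodness_path (x : Int) (y : Int) (out : Int) : Prop := out = calculate_goodness_path_alt x y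
instance (x : Int) (y : Int) (out : Int) : Decidable (Spec_calculate_goodness_path x y out) := by unfold Spec_calculate_goodness_path; infer_instance

-- ===== CLAIM (what is proved, stated in full; the proofs are below) =====
def Claim_equal_calculate_goodness_path : Prop := ∀ (x : Int) (y : Int), Dom_calculate_goodness_path x y → Pre_calculate_goodness_path x y → Spec_calculate_goodness_path x y (calculate_goodness_path x y)


-- ===== LEMMAS AND PROOFS =====

-- contribution of one node
def contrib (n : Int) : Int := if isPrime n then -n else n

-- accumulator-free version of B's loop
def fB (x : Int) (y : Int) : Int :=
  if _h : x ≠ y ∧ 0 ≤ x ∧ 0 ≤ y then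
    if x > y then contrib x + fB (PySem.Int.floordiv x 2) y
    else contrib y + fB x (PySem.Int.floordiv y 2)
  else contrib x
termination_by (x.toNat + y.toNat)
decreasing_by
  · rw [PySem.Int.floordiv_eq_ediv_of_pos (by omega : (0:Int) < 2)]
    omega
  · rw [PySem.Int.floordiv_eq_ediv_of_pos (by omega : (0:Int) < 2)]
    omega

-- the else-branch of A (the non-diagonal path computation)
def pathSum (x : Int) (y : Int) : Int :=
  match PySem.List.max? (PySem.Set.inter (PySem.Set.ofList (chainA x)) (PySem.Set.ofList (chainA y))) (fun v => v) with
  | none => 0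
  | some ca =>
    let kx := (PySem.List.index? (chainA x) ca).getD 0
    let ky := (PySem.List.index? (chainA y) ca).getD 0
    (((chainA x).take kx ++ [ca] ++ (chainA y).take ky).foldl (fun a node => if isPrime node then a - node else a + node) 0)

lemma floordiv_two (i : Int) : PySem.Int.floordiv i 2 = i / 2 :=
  PySem.Int.floordiv_eq_ediv_of_pos (by omega)

lemma A_diag (x : Int) : calculate_goodness_path x x = contrib x := by
  simp [calculate_goodness_path, contrib]

lemma A_ne (x y : Int) (h : x ≠ y) : calculate_goodness_path x y = pathSum x y := by
  simp [calculate_goodness_path, pathSum, h]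

lemma chainA_cons {i : Int} (h : 1 ≤ i) :
    chainA i = i :: chainA (PySem.Int.floordiv i 2) := by
  rw [chainA]
  split_ifs with h1 h2
  · exfalso; omega
  · exfalso; omega
  · rfl

lemma mem_chainA : ∀ (i : Int), ∀ v ∈ chainA i, 1 ≤ v ∧ v ≤ i := by
  intro i
  induction i using chainA.induct with
  | case1 => intro v hv; rw [chainA] at hv; simp at hv
  | case2 x h1 h2 => intro v hv; rw [chainA, if_neg h1, if_pos h2] at hv; simp at hv
  | case3 x h1 h2 ih =>
    intro v hv
    rw [chainA, if_neg h1, if_neg h2] at hv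
    rcases List.mem_cons.mp hv with rfl | hv
    · omega
    · have := ih v hv
      rw [floordiv_two] at this
      omega

lemma one_mem_chainA : ∀ {i : Int}, 1 ≤ i → (1 : Int) ∈ chainA i := by
  intro i
  induction i using chainA.induct with
  | case1 => intro h; exfalso; omega
  | case2 x h1 h2 => intro h; exfalso; omega
  | case3 x h1 h2 ih =>
    intro h
    rw [chainA, if_neg h1, if_neg h2]
    by_cases hx1 : x = 1
    · subst hx1; exact List.mem_cons_self
    · exact List.mem_cons_of_mem _ (ih (by rw [floordiv_two]; omega))

lemma nodup_chainA (i : Int) : (chainA i).Nodup := by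
  induction i using chainA.induct with
  | case1 => rw [chainA]; simp
  | case2 x h1 h2 => rw [chainA, if_neg h1, if_pos h2]; simp
  | case3 x h1 h2 ih =>
    rw [chainA, if_neg h1, if_neg h2]
    refine List.nodup_cons.mpr ⟨fun hm => ?_, ih⟩
    have := mem_chainA _ x hm
    rw [floordiv_two] at this
    omega

lemma max?_eq_of {l : List Int} {m : Int} (hm : m ∈ l) (hle : ∀ b ∈ l, b ≤ m) :
    PySem.List.max? l (fun v => v) = some m := by
  cases h : PySem.List.max? l (fun v => v) with
  | none =>
    rw [PySem.List.max?_eq_none_iff] at h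
    subst h; simp at hm
  | some m' =>
    have h1 := PySem.List.max?_mem h
    have h2 := PySem.List.max?_isMax h m hm
    have h3 := hle m' h1
    simp only at h2
    rw [le_antisymm h3 h2]

lemma foldl_contrib (l : List Int) (t : Int) :
    l.foldl (fun a node => if isPrime node then a - node else a + node) t
      = t + (l.map contrib).sum := by
  induction l generalizing t with
  | nil => simp
  | cons a l ih =>
    simp only [List.foldl_cons, List.map_cons, List.sum_cons, ih, contrib]
    split_ifs <;> ring

lemma ofList_chainA (i : Int) : PySem.Set.ofList (chainA i) = chainA i :=
  PySem.Set.ofList_eq_self_of_nodup _ (nodup_chainA i)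

-- the intersection as a plain filter over the first chain
lemma inter_chain (x y : Int) :
    PySem.Set.inter (PySem.Set.ofList (chainA x)) (PySem.Set.ofList (chainA y))
      = (chainA x).filter (fun v => decide (v ∈ chainA y)) := by
  rw [ofList_chainA, ofList_chainA]
  simp [PySem.Set.inter, PySem.Set.contains_eq_listContains]

lemma P1 {n : Int} (h : 1 ≤ n) : pathSum n n = contrib n := by
  unfold pathSum
  rw [inter_chain]
  have hfil : (chainA n).filter (fun v => decide (v ∈ chainA n)) = chainA n :=
    List.filter_eq_self.mpr (by intro a ha; simpa using ha)
  rw [hfil]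
  have hmax : PySem.List.max? (chainA n) (fun v => v) = some n :=
    max?_eq_of (by rw [chainA_cons h]; exact List.mem_cons_self)
      (fun b hb => (mem_chainA _ b hb).2)
  rw [hmax]
  dsimp only
  have hidx : PySem.List.index? (chainA n) n = some 0 := by
    rw [chainA_cons h]; exact PySem.List.index?_cons_self _ _
  simp only [hidx, Option.getD_some, List.take_zero, List.nil_append,
    List.singleton_append, List.foldl_cons, List.foldl_nil]
  simp only [contrib]
  split_ifs <;> ring

lemma P2 {x y : Int} (hy : 1 ≤ y) (hxy : y < x) :
    pathSum x y = contrib x + pathSum (PySem.Int.floordiv x 2) y := by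
  have hx2 : (1 : Int) ≤ PySem.Int.floordiv x 2 := by rw [floordiv_two]; omega
  have hxny : x ∉ chainA y := fun hm => by have := mem_chainA y x hm; omega
  have hcons : chainA x = x :: chainA (PySem.Int.floordiv x 2) := chainA_cons (by omega)
  unfold pathSum
  rw [inter_chain x y, inter_chain (PySem.Int.floordiv x 2) y, hcons, List.filter_cons,
    if_neg (by simpa using hxny)]
  set L := (chainA (PySem.Int.floordiv x 2)).filter (fun v => decide (v ∈ chainA y)) with hL
  have hne : L ≠ [] := by
    intro hnil
    have : (1 : Int) ∈ L := by
      rw [hL, List.mem_filter]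
      exact ⟨one_mem_chainA hx2, by simpa using one_mem_chainA hy⟩
    rw [hnil] at this; simp at this
  cases hm : PySem.List.max? L (fun v => v) with
  | none => exact absurd ((PySem.List.max?_eq_none_iff _ _).mp hm) hne
  | some ca =>
    have hmem := PySem.List.max?_mem hm
    rw [hL, List.mem_filter] at hmem
    obtain ⟨hcax, hcay⟩ := hmem
    have hcay : ca ∈ chainA y := by simpa using hcay
    have hlt : ca < x := by have := mem_chainA y ca hcay; omega
    obtain ⟨k, hk⟩ : ∃ k, PySem.List.index? (chainA (PySem.Int.floordiv x 2)) ca = some k := by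
      have := (PySem.List.index?_isSome_iff (chainA (PySem.Int.floordiv x 2)) ca).mpr hcax
      exact Option.isSome_iff_exists.mp this
    have hidx : PySem.List.index? (x :: chainA (PySem.Int.floordiv x 2)) ca
        = some (k + 1) := by
      rw [PySem.List.index?_cons_of_ne _ (by omega : x ≠ ca), hk]; rfl
    dsimp only
    simp only [hidx, hk, Option.getD_some, List.take_succ_cons]
    rw [foldl_contrib, foldl_contrib]
    simp only [List.map_append, List.map_cons, List.sum_append, List.sum_cons, contrib]
    split_ifs <;> ring

lemma P3 {x y : Int} (hx : 1 ≤ x) (hy : 1 ≤ y) : pathSum x y = pathSum y x := by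
  unfold pathSum
  rw [inter_chain x y, inter_chain y x]
  set L1 := (chainA x).filter (fun v => decide (v ∈ chainA y)) with hL1
  set L2 := (chainA y).filter (fun v => decide (v ∈ chainA x)) with hL2
  have hne : L1 ≠ [] := by
    intro hnil
    have : (1 : Int) ∈ L1 := by
      rw [hL1, List.mem_filter]
      exact ⟨one_mem_chainA hx, by simpa using one_mem_chainA hy⟩
    rw [hnil] at this; simp at this
  cases hm : PySem.List.max? L1 (fun v => v) with
  | none => exact absurd ((PySem.List.max?_eq_none_iff _ _).mp hm) hne
  | some ca =>
    have hmem := PySem.List.max?_mem hm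
    rw [hL1, List.mem_filter] at hmem
    obtain ⟨hcax, hcay⟩ := hmem
    have hm2 : PySem.List.max? L2 (fun v => v) = some ca := by
      apply max?_eq_of
      · rw [hL2, List.mem_filter]
        exact ⟨by simpa using hcay, by simpa using hcax⟩
      · intro b hb
        rw [hL2, List.mem_filter] at hb
        have hbL1 : b ∈ L1 := by
          rw [hL1, List.mem_filter]
          exact ⟨by simpa using hb.2, by simpa using hb.1⟩
        exact PySem.List.max?_isMax hm b hbL1
    rw [hm2]
    dsimp only
    rw [foldl_contrib, foldl_contrib]
    simp only [List.map_append, List.map_cons, List.sum_append, List.sum_cons, List.map_nil,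
      List.sum_nil]
    ring

lemma fB_diag (x : Int) : fB x x = contrib x := by
  rw [fB]; simp

lemma fB_gt {x y : Int} (h1 : 0 ≤ y) (h2 : y < x) :
    fB x y = contrib x + fB (PySem.Int.floordiv x 2) y := by
  rw [fB, dif_pos ⟨by omega, by omega, h1⟩, if_pos (by omega)]

lemma fB_lt {x y : Int} (h1 : 0 ≤ x) (h2 : x < y) :
    fB x y = contrib y + fB x (PySem.Int.floordiv y 2) := by
  rw [fB, dif_pos ⟨by omega, h1, by omega⟩, if_neg (by omega)]

lemma loopB_eq (x y t : Int) : loopB x y t = t + fB x y := by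
  induction x, y, t using loopB.induct with
  | case1 x y t h hgt ih =>
    simp only [dite_eq_ite] at ih
    rw [loopB, dif_pos h, if_pos hgt, ih]
    conv_rhs => rw [fB, dif_pos h, if_pos hgt]
    simp only [contrib]; ring
  | case2 x y t h hgt ih =>
    simp only [dite_eq_ite] at ih
    rw [loopB, dif_pos h, if_neg hgt, ih]
    conv_rhs => rw [fB, dif_pos h, if_neg hgt]
    simp only [contrib]; ring
  | case3 x y t h =>
    rw [loopB, dif_neg h, fB, dif_neg h]
    simp only [contrib]

lemma pathSum_eq_fB : ∀ (x y : Int), 1 ≤ x → 1 ≤ y → pathSum x y = fB x y := by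
  have key : ∀ n : Nat, ∀ x y : Int, (x + y).toNat ≤ n → 1 ≤ x → 1 ≤ y →
      pathSum x y = fB x y := by
    intro n
    induction n with
    | zero => intro x y hn hx hy; exfalso; omega
    | succ n ih =>
      intro x y hn hx hy
      rcases lt_trichotomy x y with hlt | heq | hgt
      · have h2 : (1 : Int) ≤ PySem.Int.floordiv y 2 := by rw [floordiv_two]; omega
        rw [P3 hx hy, P2 hx hlt, fB_lt (by omega) hlt, P3 h2 hx]
        congr 1
        apply ih _ _ _ hx h2
        have := floordiv_two y
        omega
      · subst heq; rw [P1 hx, fB_diag]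
      · have h2 : (1 : Int) ≤ PySem.Int.floordiv x 2 := by rw [floordiv_two]; omega
        rw [P2 hy hgt, fB_gt (by omega) hgt]
        congr 1
        apply ih _ _ _ h2 hy
        have := floordiv_two x
        omega
  intro x y hx hy
  exact key (x + y).toNat x y le_rfl hx hy

-- ===== VERDICT (by name: the statement is the Claim_ definition above) =====
theorem calculate_goodness_path_spec : Claim_equal_calculate_goodness_path := by
  intro x y _ hpre
  unfold Spec_calculate_goodness_path calculate_goodness_path_alt
  rw [loopB_eq]
  by_cases hxy : x = y
  · subst hxy
    rw [A_diag, fB_diag]; ring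
  · rcases hpre with ⟨hx, hy⟩ | h
    · rw [A_ne x y hxy, pathSum_eq_fB x y hx hy]; ring
    · exact absurd h hxy
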